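-- pv_equiv track=rewrite | github.com/AFneedWater/agar_newtech | src/agar/run.py | parse_train_devices
-- ===== SOURCE A (Python) =====
-- from typing import List, Optional, Tuple
--
-- def _parse_kv_override(arg: str) -> Tuple[str, str] | None:
--     if "=" not in arg:
--         return None
--     key, value = arg.split("=", 1)
--     key = key.lstrip("+").strip()
--     return key, value.strip()
--
-- def parse_train_devices(overrides: List[str], default: int = 1) -> int:
--     for arg in overrides:
--         kv = _parse_kv_override(arg)
--         if not kv:
--             continue
--         key, value = kv
--         if key == "train.devices":
--             try:
--                 return int(value)
--             except ValueError:
--                 return default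
--     return default
-- ===== SOURCE B (Python) =====
-- def parse_train_devices(overrides, default=1):
--     # Build a first-occurrence key->value table from the overrides, then do one lookup.
--     table = {}
--     for arg in overrides:
--         if "=" not in arg:
--             continue
--         key, value = arg.split("=", 1)
--         key = key.lstrip("+").strip()
--         if key not in table:
--             table[key] = value.strip()
--     val = table.get("train.devices")
--     if val is None:
--         return default
--     try:
--         return int(val)
--     except ValueError:
--         return default
-- ===== Notes on version B (the rewrite author's own statement) =====
-- stated objective: idiomatic
-- what changed: B replaces A's scan-with-early-return (helper parsing each arg, returning inside the loop) by building a first-occurrence key->value dict over all overrides and then performing a single get('train.devices') followed by one int-parse.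
import Mathlib
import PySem

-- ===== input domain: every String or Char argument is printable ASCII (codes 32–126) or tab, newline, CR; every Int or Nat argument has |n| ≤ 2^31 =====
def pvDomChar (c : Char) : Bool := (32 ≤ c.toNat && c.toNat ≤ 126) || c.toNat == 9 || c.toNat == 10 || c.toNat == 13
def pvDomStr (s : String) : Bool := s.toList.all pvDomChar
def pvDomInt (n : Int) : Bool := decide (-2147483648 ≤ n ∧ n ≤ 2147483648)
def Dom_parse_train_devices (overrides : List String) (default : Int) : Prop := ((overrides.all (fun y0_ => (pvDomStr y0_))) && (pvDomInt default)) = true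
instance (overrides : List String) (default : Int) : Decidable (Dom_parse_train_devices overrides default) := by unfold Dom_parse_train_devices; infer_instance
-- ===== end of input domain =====

-- B builds a first-occurrence key->value dict from the overrides and then does one lookup,
-- instead of A's scan with an early return; objective: idiomatic, same cost.

-- ===== PORT A =====
-- s.lstrip("+"): exact — Python drops the maximal leading run of '+' characters
def pvLstripPlus (s : String) : String := String.ofList (s.toList.dropWhile (· == '+'))

-- _parse_kv_override
def pvParseKV (arg : String) : Option (String × String) :=
  if PySem.Str.isIn "=" arg then
    match PySem.Str.splitMax? arg "=" 1 with
    | some (key :: value :: _) =>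
        some (PySem.Str.strip (pvLstripPlus key), PySem.Str.strip value)
    | _ => none  -- unreachable: "=" ∈ arg gives exactly two pieces
  else none

def parse_train_devices (overrides : List String) (default : Int) : Int :=
  match overrides with
  | [] => default
  | arg :: rest =>
    match pvParseKV arg with
    | none => parse_train_devices rest default
    | some (key, value) =>
      if key == "train.devices" then
        match PySem.Int.ofStr? value with
        | some n => n
        | none => default
      else parse_train_devices rest default

-- ===== PORT B =====
-- one step of B's table-building loop (first occurrence of each key wins)
def pvStep (d : PySem.Dict String String) (arg : String) : PySem.Dict String String :=
  if PySem.Str.isIn "=" arg then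
    match PySem.Str.splitMax? arg "=" 1 with
    | some (key :: value :: _) =>
        let key := PySem.Str.strip (pvLstripPlus key)
        if d.contains key then d else d.insert key (PySem.Str.strip value)
    | _ => d
  else d

def parse_train_devices_alt (overrides : List String) (default : Int) : Int :=
  let table := overrides.foldl pvStep PySem.Dict.empty
  match table.get? "train.devices" with
  | none => default
  | some v =>
    match PySem.Int.ofStr? v with
    | some n => n
    | none => default

-- ===== PRECONDITION & SPEC =====
def Spec_parse_train_devices (overrides : List String) (default : Int) (out : Int) : Prop := out = parse_train_devices_alt overrides default
instance (overrides : List String) (default : Int) (out : Int) : Decidable (Spec_parse_train_devices overrides default out) := by unfold Spec_parse_train_devices; infer_instance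

-- ===== CLAIM (what is proved, stated in full; the proofs are below) =====
def Claim_equal_parse_train_devices : Prop := ∀ (overrides : List String) (default : Int), Dom_parse_train_devices overrides default → Spec_parse_train_devices overrides default (parse_train_devices overrides default)

-- ===== LEMMAS AND PROOFS =====

-- B's loop never overwrites: an existing binding survives the rest of the fold
theorem pv_build_preserves (l : List String) (d : PySem.Dict String String) (v : String)
    (h : d.get? "train.devices" = some v) :
    (l.foldl pvStep d).get? "train.devices" = some v := by
  induction l generalizing d with
  | nil => simpa using h
  | cons arg rest ih =>
    simp only [List.foldl_cons]
    apply ih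
    unfold pvStep
    split_ifs with h1
    · cases hsp : PySem.Str.splitMax? arg "=" 1 with
      | none => simpa [hsp] using h
      | some pieces =>
        match pieces with
        | [] => simpa [hsp] using h
        | [k] => simpa [hsp] using h
        | k :: v' :: t =>
          simp only []
          split_ifs with h2
          · exact h
          · rw [PySem.Dict.get?_insert_of_ne]
            · exact h
            · intro heq
              rw [← heq, PySem.Dict.contains_eq_isSome_get?, h] at h2
              simp at h2
    · exact h

-- main invariant: the fold started from a table not yet containing "train.devices",
-- followed by the single lookup, computes A's early-return scan
theorem pv_invariant (l : List String) (default : Int) (d : PySem.Dict String String)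
    (h : d.get? "train.devices" = none) :
    (match (l.foldl pvStep d).get? "train.devices" with
     | none => default
     | some v =>
       match PySem.Int.ofStr? v with
       | some n => n
       | none => default) = parse_train_devices l default := by
  induction l generalizing d with
  | nil => simp [parse_train_devices, h]
  | cons arg rest ih =>
    simp only [List.foldl_cons]
    rw [parse_train_devices]
    unfold pvParseKV
    split_ifs with h1
    · cases hsp : PySem.Str.splitMax? arg "=" 1 with
      | none =>
        have hstep : pvStep d arg = d := by unfold pvStep; rw [if_pos h1, hsp]
        rw [hstep]; exact ih d h
      | some pieces =>
        match pieces with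
        | [] =>
          have hstep : pvStep d arg = d := by unfold pvStep; rw [if_pos h1, hsp]
          rw [hstep]; exact ih d h
        | [k] =>
          have hstep : pvStep d arg = d := by unfold pvStep; rw [if_pos h1, hsp]
          rw [hstep]; exact ih d h
        | k :: v' :: t =>
          simp only
          by_cases hk : PySem.Str.strip (pvLstripPlus k) = "train.devices"
          · have hc : d.contains (PySem.Str.strip (pvLstripPlus k)) = false := by
              rw [PySem.Dict.contains_eq_isSome_get?, hk, h]; rfl
            rw [hk] at hc
            have hstep : pvStep d arg = d.insert "train.devices" (PySem.Str.strip v') := by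
              unfold pvStep; rw [if_pos h1, hsp]; simp only [hk, hc]; rfl
            rw [hstep,
              pv_build_preserves rest _ _ (PySem.Dict.get?_insert_self ..)]
            simp [hk]
          · have hkb : (PySem.Str.strip (pvLstripPlus k) == "train.devices") = false := by
              simpa using hk
            simp only [hkb, Bool.false_eq_true, if_false]
            by_cases h2 : d.contains (PySem.Str.strip (pvLstripPlus k)) = true
            · have hstep : pvStep d arg = d := by
                unfold pvStep; rw [if_pos h1, hsp]; simp [h2]
              rw [hstep]; exact ih d h
            · have hstep : pvStep d arg
                  = d.insert (PySem.Str.strip (pvLstripPlus k)) (PySem.Str.strip v') := by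
                unfold pvStep; rw [if_pos h1, hsp]; simp only []
                rw [if_neg h2]
              rw [hstep]
              exact ih _ (by rw [PySem.Dict.get?_insert_of_ne _ _ (fun e => hk e.symm), h])
    · have hstep : pvStep d arg = d := by unfold pvStep; rw [if_neg h1]
      rw [hstep]; exact ih d h

-- ===== VERDICT (by name: the statement is the Claim_ definition above) =====
theorem parse_train_devices_spec : Claim_equal_parse_train_devices := by
  intro overrides default _
  unfold Spec_parse_train_devices parse_train_devices_alt
  exact (pv_invariant overrides default PySem.Dict.empty (PySem.Dict.get?_empty _)).symm
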